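-- pv_equiv track=rewrite | github.com/ABradwell/Portfolio | Python/Basic_Abilities/Loops & reccursion/Longest Run.py | two_length_run
-- ===== SOURCE A (Python) =====
-- def two_length_run (listone):
--     ''' (list) --> Boolean
--     Accepts a list,w hich it then checks to see any back-to-back number placements within
--     If there is a back to back placement, a boolean responds accordingly
--
--     Preconditions: the list entered is already divided and must be all float
--     '''
--     index = 0
--     confirmed = False
--     while (index + 1) < len(listone):
--         if listone[index] == listone[index + 1]:
--             confirmed = True
--             break
--         else :
--             index = index  + 1
--     return confirmed
-- ===== SOURCE B (Python) =====
-- def two_length_run(listone):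
--     # Run-length encode the list in one pass, then check for any run longer than 1.
--     runs = []
--     for x in listone:
--         if runs and runs[-1][0] == x:
--             y, c = runs[-1]
--             runs[-1] = (y, c + 1)
--         else:
--             runs.append((x, 1))
--     return any(c > 1 for _, c in runs)
-- ===== Notes on version B (the rewrite author's own statement) =====
-- stated objective: alternative
-- what changed: Replaces the indexed while-loop with early break by a run-length encoding pass (value,count pairs) followed by a check for any run of length > 1.
import Mathlib
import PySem

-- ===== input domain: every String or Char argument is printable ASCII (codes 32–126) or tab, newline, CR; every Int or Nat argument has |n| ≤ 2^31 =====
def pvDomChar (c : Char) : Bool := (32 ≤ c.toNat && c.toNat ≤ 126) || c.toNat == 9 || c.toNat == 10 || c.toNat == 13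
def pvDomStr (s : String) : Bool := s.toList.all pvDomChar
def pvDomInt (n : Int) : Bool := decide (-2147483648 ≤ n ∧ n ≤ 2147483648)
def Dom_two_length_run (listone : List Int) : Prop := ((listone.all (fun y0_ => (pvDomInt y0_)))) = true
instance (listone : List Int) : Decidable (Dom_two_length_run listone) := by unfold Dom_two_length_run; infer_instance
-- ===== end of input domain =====

-- B replaces A's indexed while-loop (break on first adjacent equal pair) by a one-pass
-- run-length encoding followed by a check for a run of length > 1 (alternative decomposition).


-- ===== PORT A =====
-- the while loop: index advances while index+1 < len, breaks (returns true) on an adjacent equal pair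
def two_length_run_aux (listone : List Int) (index : Nat) : Bool :=
  if _h : index + 1 < listone.length then
    if listone[index]? == listone[index + 1]? then true
    else two_length_run_aux listone (index + 1)
  else false
termination_by listone.length - index
decreasing_by omega

def two_length_run (listone : List Int) : Bool :=
  two_length_run_aux listone 0

-- ===== PORT B =====
-- one iteration of B's for-loop: extend the last run or start a new one
def two_length_run_step (runs : List (Int × Int)) (x : Int) : List (Int × Int) :=
  match runs.getLast? with
  | some (y, c) => if y == x then runs.dropLast ++ [(y, c + 1)] else runs ++ [(x, 1)]
  | none => runs ++ [(x, 1)]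

def two_length_run_alt (listone : List Int) : Bool :=
  (listone.foldl two_length_run_step []).any (fun p => decide (1 < p.2))

-- ===== PRECONDITION & SPEC =====
def Spec_two_length_run (listone : List Int) (out : Bool) : Prop := out = two_length_run_alt listone
instance (listone : List Int) (out : Bool) : Decidable (Spec_two_length_run listone out) := by unfold Spec_two_length_run; infer_instance

-- ===== CLAIM (what is proved, stated in full; the proofs are below) =====
def Claim_equal_two_length_run : Prop := ∀ (listone : List Int), Dom_two_length_run listone → Spec_two_length_run listone (two_length_run listone)

-- ===== LEMMAS AND PROOFS =====

-- common characterisation: "some adjacent pair of equal elements"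
def pvAdj : List Int → Bool
  | [] => false
  | [_] => false
  | a :: b :: t => a == b || pvAdj (b :: t)

theorem pvAdj_short (l : List Int) (h : l.length ≤ 1) : pvAdj l = false := by
  match l, h with
  | [], _ => rfl
  | [_], _ => rfl

theorem aux_eq_pvAdj (listone : List Int) (index : Nat) :
    two_length_run_aux listone index = pvAdj (listone.drop index) := by
  induction index using two_length_run_aux.induct (listone := listone) with
  | case1 i h heq =>
    rw [two_length_run_aux]
    have h1 : i < listone.length := by omega
    have heq' : listone[i] = listone[i + 1] := by
      simpa [List.getElem?_eq_getElem, h1, h] using heq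
    rw [List.drop_eq_getElem_cons h1, List.drop_eq_getElem_cons h]
    simp [pvAdj, h, heq', List.getElem?_eq_getElem h1]
  | case2 i h heq ih =>
    rw [two_length_run_aux]
    have h1 : i < listone.length := by omega
    have hne : ¬ listone[i] = listone[i + 1] := by
      simpa [List.getElem?_eq_getElem, h1, h] using heq
    rw [List.drop_eq_getElem_cons h] at ih
    rw [List.drop_eq_getElem_cons h1, List.drop_eq_getElem_cons h]
    simp [pvAdj, h, hne, ih, List.getElem?_eq_getElem h1]
  | case3 i h =>
    rw [two_length_run_aux]
    simp only [h, dite_false]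
    rw [pvAdj_short _ (by simp only [List.length_drop]; omega)]

theorem alt_loop (xs : List Int) :
    ∀ (runs : List (Int × Int)) (y c : Int), 1 ≤ c →
      (xs.foldl two_length_run_step (runs ++ [(y, c)])).any (fun p => decide (1 < p.2))
        = ((runs ++ [(y, c)]).any (fun p => decide (1 < p.2)) || pvAdj (y :: xs)) := by
  induction xs with
  | nil => intro runs y c _; simp [pvAdj]
  | cons x xs ih =>
    intro runs y c hc
    rw [List.foldl_cons]
    have hstep : two_length_run_step (runs ++ [(y, c)]) x =
        if y == x then runs ++ [(y, c + 1)] else (runs ++ [(y, c)]) ++ [(x, 1)] := by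
      simp [two_length_run_step]
    by_cases hyx : y = x
    · rw [hstep, if_pos (by simp [hyx])]
      rw [ih runs y (c + 1) (by omega)]
      have : pvAdj (y :: x :: xs) = true := by simp [pvAdj, hyx]
      simp [this, show (1 : Int) < c + 1 by omega]
    · rw [hstep, if_neg (by simp [hyx])]
      rw [ih (runs ++ [(y, c)]) x 1 le_rfl]
      have : pvAdj (y :: x :: xs) = pvAdj (x :: xs) := by simp [pvAdj, hyx]
      simp [this, Bool.or_assoc]

theorem a_eq_b (listone : List Int) : two_length_run listone = two_length_run_alt listone := by
  cases listone with
  | nil =>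
    rw [two_length_run, two_length_run_aux, two_length_run_alt]
    simp
  | cons x xs =>
    rw [two_length_run, aux_eq_pvAdj, List.drop_zero]
    rw [two_length_run_alt, List.foldl_cons]
    have hstep : two_length_run_step [] x = [] ++ [(x, 1)] := by rfl
    rw [hstep, alt_loop xs [] x 1 le_rfl]
    simp

-- ===== VERDICT (by name: the statement is the Claim_ definition above) =====
theorem two_length_run_spec : Claim_equal_two_length_run := by
  intro listone _
  unfold Spec_two_length_run
  exact a_eq_b listone
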